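-- pv_equiv track=rewrite | github.com/voglster/advent_of_code | d4.py | get_sleep_minutes
-- ===== SOURCE A (Python) =====
-- def get_sleep_minutes(schedule):
--     total = 0
--     last_state = 'awake'
--
--     lkp = dict(schedule)
--
--     for i in range(60):
--         last_state = lkp.get(i, last_state)
--         if last_state == 'sleep':
--             total += 1
--
--     return total
-- ===== SOURCE B (Python) =====
-- def get_sleep_minutes(schedule):
--     events = sorted(
--         ((m, s) for m, s in dict(schedule).items() if 0 <= m < 60),
--         key=lambda p: p[0],
--     )
--     total = 0
--     state = 'awake'
--     start = 0
--     for m, s in events: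
--         if state == 'sleep':
--             total += m - start
--         state, start = s, m
--     if state == 'sleep':
--         total += 60 - start
--     return total
-- ===== Notes on version B (the rewrite author's own statement) =====
-- stated objective: alternative
-- what changed: B replaces A's 60-step minute-by-minute simulation with dict carry-over by an interval sweep: it sorts the in-range [0,60) entries of dict(schedule) by minute and sums the lengths of the sleep intervals between consecutive events.
import Mathlib
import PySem

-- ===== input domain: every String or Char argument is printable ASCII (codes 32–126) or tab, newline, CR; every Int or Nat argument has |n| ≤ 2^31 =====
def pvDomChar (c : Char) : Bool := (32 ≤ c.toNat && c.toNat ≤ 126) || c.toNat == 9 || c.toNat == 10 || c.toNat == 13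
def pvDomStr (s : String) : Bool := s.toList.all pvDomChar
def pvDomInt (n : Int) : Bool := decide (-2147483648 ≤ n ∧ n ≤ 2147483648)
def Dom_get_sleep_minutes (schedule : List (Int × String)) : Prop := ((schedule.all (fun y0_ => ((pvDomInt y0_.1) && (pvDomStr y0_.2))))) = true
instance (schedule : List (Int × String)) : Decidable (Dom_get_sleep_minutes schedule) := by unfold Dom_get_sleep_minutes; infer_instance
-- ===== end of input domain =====

-- B replaces A's minute-by-minute simulation with an event sweep over the sorted in-range
-- schedule entries, summing interval lengths (objective: alternative algorithm, same cost class).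

-- ===== PORT A =====
def get_sleep_minutes (schedule : List (Int × String)) : Int :=
  let lkp := PySem.Dict.ofList schedule
  let r := (PySem.List.pyRange 0 60 1).foldl
    (fun (st : Int × String) i =>
      let last := lkp.getD i st.2
      (st.1 + (if last == "sleep" then 1 else 0), last))
    (0, "awake")
  r.1

-- ===== PORT B =====
def get_sleep_minutes_alt (schedule : List (Int × String)) : Int :=
  let d := PySem.Dict.ofList schedule
  let events := PySem.List.sorted
    (d.items.filter (fun p => decide (0 ≤ p.1) && decide (p.1 < 60)))
    (fun p => p.1) false
  let r := events.foldl
    (fun (st : Int × String × Int) p =>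
      ((if st.2.1 == "sleep" then st.1 + (p.1 - st.2.2) else st.1), p.2, p.1))
    (0, "awake", 0)
  if r.2.1 == "sleep" then r.1 + (60 - r.2.2) else r.1

-- ===== PRECONDITION & SPEC =====
def Spec_get_sleep_minutes (schedule : List (Int × String)) (out : Int) : Prop := out = get_sleep_minutes_alt schedule
instance (schedule : List (Int × String)) (out : Int) : Decidable (Spec_get_sleep_minutes schedule out) := by unfold Spec_get_sleep_minutes; infer_instance

-- ===== CLAIM (what is proved, stated in full; the proofs are below) =====
def Claim_equal_get_sleep_minutes : Prop := ∀ (schedule : List (Int × String)), Dom_get_sleep_minutes schedule → Spec_get_sleep_minutes schedule (get_sleep_minutes schedule)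

-- ===== LEMMAS AND PROOFS =====

-- first value in an association list whose key equals i (Python-style lookup)
def pvLk (es : List (Int × String)) (i : Int) : Option String :=
  match es with
  | [] => none
  | (m, v) :: t => if m = i then some v else pvLk t i

-- state at minute i induced by an event list: value of the last event with key ≤ i
-- (reads the list front to back, so it is "the" state only for key-sorted lists)
def pvG (es : List (Int × String)) (s : String) (i : Int) : String :=
  match es with
  | [] => s
  | (m, v) :: t => if m ≤ i then pvG t v i else s

def pvInd (s : String) : Int := if s == "sleep" then 1 else 0

-- per-minute state of A's carry loop
def pvSt (d : PySem.Dict Int String) : Nat → String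
  | 0 => "awake"
  | n + 1 => d.getD (n : Int) (pvSt d n)

theorem pvG_all_gt (es : List (Int × String)) (s : String) (i : Int)
    (h : ∀ p ∈ es, i < p.1) : pvG es s i = s := by
  cases es with
  | nil => rfl
  | cons p t =>
    obtain ⟨m, v⟩ := p
    have : ¬ m ≤ i := by have := h (m, v) (List.mem_cons_self ..); omega
    simp [pvG, this]

theorem pvLk_all_ne (es : List (Int × String)) (i : Int)
    (h : ∀ p ∈ es, p.1 ≠ i) : pvLk es i = none := by
  induction es with
  | nil => rfl
  | cons p t ih =>
    obtain ⟨m, v⟩ := p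
    have hm : m ≠ i := h (m, v) (List.mem_cons_self ..)
    simp only [pvLk, if_neg hm]
    exact ih fun q hq => h q (List.mem_cons_of_mem _ hq)

theorem pvLk_mem (es : List (Int × String)) (i : Int) (v : String)
    (h : pvLk es i = some v) : (i, v) ∈ es := by
  induction es with
  | nil => simp [pvLk] at h
  | cons p t ih =>
    obtain ⟨m, w⟩ := p
    by_cases hm : m = i
    · simp only [pvLk, if_pos hm] at h
      subst hm; cases h; exact List.mem_cons_self ..
    · simp only [pvLk, if_neg hm] at h
      exact List.mem_cons_of_mem _ (ih h)

theorem pvLk_isSome_of_mem (es : List (Int × String)) (i : Int) (v : String)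
    (h : (i, v) ∈ es) : (pvLk es i).isSome := by
  induction es with
  | nil => simp at h
  | cons p t ih =>
    obtain ⟨m, w⟩ := p
    by_cases hm : m = i
    · simp [pvLk, hm]
    · rcases List.mem_cons.mp h with h1 | h1
      · cases h1; simp at hm
      · simp only [pvLk, if_neg hm]; exact ih h1

-- one-step characterisation of pvG on a strictly key-sorted list
theorem pvG_step (es : List (Int × String)) (s : String) (i : Int)
    (hp : es.Pairwise (fun a b => a.1 < b.1)) :
    pvG es s i = (pvLk es i).getD (pvG es s (i - 1)) := by
  induction es generalizing s with
  | nil => rfl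
  | cons p t ih =>
    obtain ⟨m, v⟩ := p
    rw [List.pairwise_cons] at hp
    obtain ⟨hm, ht⟩ := hp
    by_cases hmi : m = i
    · subst hmi
      have h1 : pvG t v m = v := pvG_all_gt t v m hm
      simp [pvG, pvLk, h1]
    · by_cases hle : m ≤ i
      · have hlt : m < i := lt_of_le_of_ne hle hmi
        have hle' : m ≤ i - 1 := by omega
        simp only [pvG, pvLk, if_pos hle, if_neg hmi, if_pos hle']
        exact ih v ht
      · have h1 : i < m := by omega
        have h2 : ¬ m ≤ i - 1 := by omega
        have h3 : pvLk t i = none := pvLk_all_ne t i fun q hq => by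
          have := hm q hq; omega
        simp [pvG, pvLk, hle, hmi, h2, h3]

theorem pvA_fold (d : PySem.Dict Int String) (n : Nat) :
    (PySem.List.pyRange 0 (n : Int) 1).foldl
      (fun (st : Int × String) i =>
        let last := d.getD i st.2
        (st.1 + (if last == "sleep" then 1 else 0), last))
      (0, "awake")
    = (((List.range n).map (fun k => pvInd (pvSt d (k + 1)))).sum, pvSt d n) := by
  induction n with
  | zero => simp [PySem.List.pyRange_one_eq_nil, pvSt]
  | succ n ih =>
    have hcast : ((n + 1 : Nat) : Int) = (n : Int) + 1 := by push_cast; ring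
    rw [hcast, PySem.List.pyRange_one_succ_right (by positivity), List.foldl_append, ih]
    simp [List.range_succ, pvSt, pvInd]

theorem pv_sum_const (l : List Int) (c : Int) : (l.map (fun _ => c)).sum = l.length * c := by
  induction l with
  | nil => simp
  | cons x t ih =>
    simp only [List.map_cons, List.sum_cons, ih, List.length_cons]
    push_cast; ring

theorem pvB_sweep (es : List (Int × String)) (total : Int) (state : String) (start : Int)
    (hp : es.Pairwise (fun a b => a.1 < b.1))
    (hr : ∀ p ∈ es, start ≤ p.1 ∧ p.1 < 60)
    (h0 : 0 ≤ start) (h60 : start ≤ 60) :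
    (if (es.foldl
        (fun (st : Int × String × Int) p =>
          ((if st.2.1 == "sleep" then st.1 + (p.1 - st.2.2) else st.1), p.2, p.1))
        (total, state, start)).2.1 == "sleep"
     then (es.foldl
        (fun (st : Int × String × Int) p =>
          ((if st.2.1 == "sleep" then st.1 + (p.1 - st.2.2) else st.1), p.2, p.1))
        (total, state, start)).1 + (60 - (es.foldl
        (fun (st : Int × String × Int) p =>
          ((if st.2.1 == "sleep" then st.1 + (p.1 - st.2.2) else st.1), p.2, p.1))
        (total, state, start)).2.2)
     else (es.foldl
        (fun (st : Int × String × Int) p =>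
          ((if st.2.1 == "sleep" then st.1 + (p.1 - st.2.2) else st.1), p.2, p.1))
        (total, state, start)).1)
    = total + ((PySem.List.pyRange start 60 1).map (fun i => pvInd (pvG es state i))).sum := by
  induction es generalizing total state start with
  | nil =>
    have hmap : (PySem.List.pyRange start 60 1).map (fun i => pvInd (pvG [] state i))
        = (PySem.List.pyRange start 60 1).map (fun _ => pvInd state) := rfl
    simp only [List.foldl_nil, hmap, pv_sum_const, PySem.List.length_pyRange_one]
    by_cases hs : state == "sleep" <;> simp [pvInd, hs] <;> omega
  | cons p t ih =>
    obtain ⟨m, v⟩ := p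
    rw [List.pairwise_cons] at hp
    obtain ⟨hm, ht⟩ := hp
    have hmem := hr (m, v) (List.mem_cons_self ..)
    have hms : start ≤ m := hmem.1
    have hm60 : m < 60 := hmem.2
    have hr' : ∀ p ∈ t, m ≤ p.1 ∧ p.1 < 60 := fun q hq =>
      ⟨le_of_lt (hm q hq), (hr q (List.mem_cons_of_mem _ hq)).2⟩
    have hsplit : PySem.List.pyRange start 60 1
        = PySem.List.pyRange start m 1 ++ PySem.List.pyRange m 60 1 :=
      PySem.List.pyRange_one_append start m 60 hms (by omega)
    have hlow : (PySem.List.pyRange start m 1).map (fun i => pvInd (pvG ((m, v) :: t) state i))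
        = (PySem.List.pyRange start m 1).map (fun _ => pvInd state) := by
      apply List.map_congr_left
      intro i hi
      rw [PySem.List.mem_pyRange_one] at hi
      have : ¬ m ≤ i := by omega
      simp [pvG, this]
    have hhigh : (PySem.List.pyRange m 60 1).map (fun i => pvInd (pvG ((m, v) :: t) state i))
        = (PySem.List.pyRange m 60 1).map (fun i => pvInd (pvG t v i)) := by
      apply List.map_congr_left
      intro i hi
      rw [PySem.List.mem_pyRange_one] at hi
      simp [pvG, hi.1]
    rw [List.foldl_cons]
    rw [ih (if state == "sleep" then total + (m - start) else total) v m ht hr'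
        (by omega) (by omega)]
    rw [hsplit, List.map_append, List.sum_append, hlow, hhigh,
        pv_sum_const, PySem.List.length_pyRange_one]
    by_cases hs : state == "sleep"
    · have h1 : ((m - start).toNat : Int) = m - start := by omega
      simp only [pvInd, hs, if_pos]
      rw [h1]; ring
    · simp only [pvInd, hs, if_false, Bool.false_eq_true]
      ring

-- the event list B sweeps over
def pvEvents (schedule : List (Int × String)) : List (Int × String) :=
  PySem.List.sorted
    ((PySem.Dict.ofList schedule).items.filter (fun p => decide (0 ≤ p.1) && decide (p.1 < 60)))
    (fun p => p.1) false

theorem pvEvents_range (schedule : List (Int × String)) :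
    ∀ p ∈ pvEvents schedule, 0 ≤ p.1 ∧ p.1 < 60 := by
  intro p hp
  rw [pvEvents, PySem.List.mem_sorted, List.mem_filter] at hp
  have := hp.2
  simp at this
  exact this

theorem pvEvents_pairwise (schedule : List (Int × String)) :
    (pvEvents schedule).Pairwise (fun a b => a.1 < b.1) := by
  have hle := PySem.List.sorted_pairwise
    ((PySem.Dict.ofList schedule).items.filter (fun p => decide (0 ≤ p.1) && decide (p.1 < 60)))
    (fun p => p.1)
  have hnk : ((PySem.Dict.ofList schedule).items.map Prod.fst).Nodup :=
    PySem.Dict.nodup_keys_ofList schedule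
  have hsub : (((PySem.Dict.ofList schedule).items.filter
      (fun p => decide (0 ≤ p.1) && decide (p.1 < 60))).map Prod.fst).Nodup :=
    hnk.sublist (List.Sublist.map _ List.filter_sublist)
  have hperm : ((pvEvents schedule).map Prod.fst).Perm
      (((PySem.Dict.ofList schedule).items.filter
        (fun p => decide (0 ≤ p.1) && decide (p.1 < 60))).map Prod.fst) :=
    (PySem.List.sorted_perm _ _ _).map Prod.fst
  have hnd : ((pvEvents schedule).map Prod.fst).Nodup := hperm.nodup_iff.mpr hsub
  rw [List.Nodup, List.pairwise_map] at hnd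
  exact (hle.and hnd).imp fun h => lt_of_le_of_ne h.1 h.2

theorem pvLk_events (schedule : List (Int × String)) (i : Int)
    (h0 : 0 ≤ i) (h60 : i < 60) :
    pvLk (pvEvents schedule) i = (PySem.Dict.ofList schedule).get? i := by
  have hnk : (PySem.Dict.ofList schedule).keys.Nodup := PySem.Dict.nodup_keys_ofList schedule
  have hmem : ∀ v : String, (i, v) ∈ pvEvents schedule ↔
      (i, v) ∈ (PySem.Dict.ofList schedule).items := by
    intro v
    rw [pvEvents, PySem.List.mem_sorted, List.mem_filter]
    constructor
    · exact fun h => h.1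
    · intro h; refine ⟨h, ?_⟩; simp; omega
  cases hlk : pvLk (pvEvents schedule) i with
  | some v =>
    have := (hmem v).mp (pvLk_mem _ _ _ hlk)
    exact ((PySem.Dict.get?_eq_some_iff_mem_items _ _ _ hnk).mpr this).symm
  | none =>
    cases hg : (PySem.Dict.ofList schedule).get? i with
    | none => rfl
    | some v =>
      have := (hmem v).mpr ((PySem.Dict.get?_eq_some_iff_mem_items _ _ _ hnk).mp hg)
      have := pvLk_isSome_of_mem _ _ _ this
      rw [hlk] at this
      simp at this

theorem pvBridge (schedule : List (Int × String)) (n : Nat) (hn : n < 60) :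
    pvSt (PySem.Dict.ofList schedule) (n + 1) = pvG (pvEvents schedule) "awake" (n : Int) := by
  induction n with
  | zero =>
    have hg : pvG (pvEvents schedule) "awake" (-1) = "awake" :=
      pvG_all_gt _ _ _ fun p hp => by have := (pvEvents_range schedule p hp).1; omega
    rw [pvG_step _ _ _ (pvEvents_pairwise schedule)]
    have : ((0 : Nat) : Int) - 1 = -1 := by omega
    rw [this, hg]
    norm_num
    rw [pvLk_events schedule 0 (by omega) (by omega)]
    simp [pvSt, PySem.Dict.getD_eq_get?_getD]
  | succ n ih =>
    have ih' := ih (by omega)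
    rw [pvG_step _ _ _ (pvEvents_pairwise schedule)]
    have hc : ((n + 1 : Nat) : Int) - 1 = (n : Int) := by push_cast; ring
    rw [hc, ← ih', pvLk_events schedule _ (by positivity) (by exact_mod_cast hn)]
    simp [pvSt, PySem.Dict.getD_eq_get?_getD]

-- ===== VERDICT (by name: the statement is the Claim_ definition above) =====
theorem get_sleep_minutes_spec : Claim_equal_get_sleep_minutes := by
  intro schedule _
  show get_sleep_minutes schedule = get_sleep_minutes_alt schedule
  have hA := pvA_fold (PySem.Dict.ofList schedule) 60
  have hB := pvB_sweep (pvEvents schedule) 0 "awake" 0 (pvEvents_pairwise schedule)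
      (fun p hp => (pvEvents_range schedule p hp)) le_rfl (by omega)
  show ((PySem.List.pyRange 0 ((60 : Nat) : Int) 1).foldl
      (fun (st : Int × String) i =>
        let last := (PySem.Dict.ofList schedule).getD i st.2
        (st.1 + (if last == "sleep" then 1 else 0), last))
      (0, "awake")).1
    = (if ((pvEvents schedule).foldl
          (fun (st : Int × String × Int) p =>
            ((if st.2.1 == "sleep" then st.1 + (p.1 - st.2.2) else st.1), p.2, p.1))
          (0, "awake", 0)).2.1 == "sleep"
       then ((pvEvents schedule).foldl
          (fun (st : Int × String × Int) p =>
            ((if st.2.1 == "sleep" then st.1 + (p.1 - st.2.2) else st.1), p.2, p.1))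
          (0, "awake", 0)).1 + (60 - ((pvEvents schedule).foldl
          (fun (st : Int × String × Int) p =>
            ((if st.2.1 == "sleep" then st.1 + (p.1 - st.2.2) else st.1), p.2, p.1))
          (0, "awake", 0)).2.2)
       else ((pvEvents schedule).foldl
          (fun (st : Int × String × Int) p =>
            ((if st.2.1 == "sleep" then st.1 + (p.1 - st.2.2) else st.1), p.2, p.1))
          (0, "awake", 0)).1)
  rw [hA, hB]
  simp only [zero_add]
  rw [PySem.List.pyRange_one, List.map_map]
  norm_num
  apply congrArg List.sum
  apply List.map_congr_left
  intro k hk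
  rw [List.mem_range] at hk
  simp only [Function.comp]
  rw [pvBridge schedule k hk]
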